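-- pv_equiv track=rewrite | github.com/ChynPet/pythoniasa19fall | assignment04.py | task6
-- ===== SOURCE A (Python) =====
-- def task6(text, censored):
--     """
--     Given the censored text and the list of censored letters, output the uncensored text.
--
--     >>> task6('Wh*r* d*d my v*w*ls g*?', 'eeioeo')
--     'Where did my vowels go?'
--     >>> task6('abcd', '')
--     'abcd'
--     >>> task6('*PP*RC*S*', 'UEAE')
--     'UPPERCASE'
--     """
--     res = ''
--     j = 0
--     for i in text:
--         if i != '*':
--             res += i
--         else:
--             res += censored[j]
--             j += 1
--     return res
-- ===== SOURCE B (Python) =====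
-- def task6(text, censored):
--     parts = text.split('*')
--     return parts[0] + ''.join(c + p for c, p in zip(censored, parts[1:]))
-- ===== Notes on version B (the rewrite author's own statement) =====
-- stated objective: idiomatic
-- what changed: B replaces A's character-by-character scan with a censored-letter counter by split('*') followed by reassembling the segments interleaved with zip(censored, parts[1:]) and one join.
import Mathlib
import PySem

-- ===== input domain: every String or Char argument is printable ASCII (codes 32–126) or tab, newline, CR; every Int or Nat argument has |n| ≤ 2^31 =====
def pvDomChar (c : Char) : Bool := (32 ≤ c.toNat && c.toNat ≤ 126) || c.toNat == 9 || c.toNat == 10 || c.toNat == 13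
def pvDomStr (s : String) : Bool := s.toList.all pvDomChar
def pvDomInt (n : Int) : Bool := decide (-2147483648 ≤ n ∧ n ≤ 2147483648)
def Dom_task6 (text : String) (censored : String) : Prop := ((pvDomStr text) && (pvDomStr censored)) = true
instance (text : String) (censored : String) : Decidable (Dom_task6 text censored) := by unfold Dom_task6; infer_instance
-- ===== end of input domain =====

-- B replaces A's character scan (counter into censored) by split('*') + zip/join reassembly; equal wherever A returns.

-- ===== PORT A =====
-- A: res = ''; j = 0; for i in text: if i != '*': res += i else: res += censored[j]; j += 1
-- censored[j] is ported as PySem.List.pyGetD (total form); Pre_task6 keeps every access in range.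
def task6 (text : String) (censored : String) : String :=
  let st := text.toList.foldl
    (fun (st : List Char × Int) i =>
      if i ≠ '*' then (st.1 ++ [i], st.2)
      else (st.1 ++ [PySem.List.pyGetD censored.toList st.2 '?'], st.2 + 1))
    ([], 0)
  String.ofList st.1

-- ===== PORT B =====
-- B: parts = text.split('*'); parts[0] + ''.join(c + p for c, p in zip(censored, parts[1:]))
def task6_alt (text : String) (censored : String) : String :=
  let parts := PySem.Chars.splitOn text.toList ['*']
  String.ofList (parts.headD [] ++
    PySem.Chars.join [] ((censored.toList.zip parts.tail).map (fun p => p.1 :: p.2)))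

-- ===== PRECONDITION & SPEC =====
-- Pre_ excludes exactly the inputs with more '*' in text than letters in censored: there A raises IndexError.
def Pre_task6 (text : String) (censored : String) : Prop :=
  text.toList.count '*' ≤ censored.toList.length
instance (text : String) (censored : String) : Decidable (Pre_task6 text censored) := by
  unfold Pre_task6; infer_instance
def pvWitness_task6 : String × String := ("Wh*r* d*d my v*w*ls g*?", "eeioeo")
def Spec_task6 (text : String) (censored : String) (out : String) : Prop := out = task6_alt text censored
instance (text : String) (censored : String) (out : String) : Decidable (Spec_task6 text censored out) := by unfold Spec_task6; infer_instance

-- ===== CLAIM (what is proved, stated in full; the proofs are below) =====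
def Claim_equal_task6 : Prop := ∀ (text : String) (censored : String), Dom_task6 text censored → Pre_task6 text censored → Spec_task6 text censored (task6 text censored)

-- ===== LEMMAS AND PROOFS =====

-- reference splitter: text.split('*') built front to back with an accumulated current segment
def pvSplit : List Char → List Char → List (List Char)
  | pre, [] => [pre]
  | pre, c :: t => if c = '*' then pre :: pvSplit [] t else pvSplit (pre ++ [c]) t

-- reference interleaving: the uncensored text, stars replaced head-first from ks
def pvInter : List Char → List Char → List Char
  | [], _ => []
  | c :: t, ks => if c = '*' then ks.headD '?' :: pvInter t ks.tail else c :: pvInter t ks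

lemma pvSplit_nil (pre : List Char) : pvSplit pre [] = [pre] := rfl
lemma pvSplit_star (pre t : List Char) : pvSplit pre ('*' :: t) = pre :: pvSplit [] t := by
  simp [pvSplit]
lemma pvSplit_char {c : Char} (h : c ≠ '*') (pre t : List Char) :
    pvSplit pre (c :: t) = pvSplit (pre ++ [c]) t := by
  simp [pvSplit, h]
lemma pvInter_star (t ks : List Char) :
    pvInter ('*' :: t) ks = ks.headD '?' :: pvInter t ks.tail := by simp [pvInter]
lemma pvInter_char {c : Char} (h : c ≠ '*') (t ks : List Char) :
    pvInter (c :: t) ks = c :: pvInter t ks := by simp [pvInter, h]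

lemma pv_join_nil_cons (x : List Char) (xs : List (List Char)) :
    PySem.Chars.join [] (x :: xs) = x ++ PySem.Chars.join [] xs := by
  cases xs with
  | nil => simp [PySem.Chars.join_singleton, PySem.Chars.join_nil]
  | cons y ys => rw [PySem.Chars.join_cons_cons]; simp

lemma pv_foldA (cen : List Char) :
    ∀ (t res : List Char) (j : Nat),
      t.foldl
        (fun (st : List Char × Int) i =>
          if i ≠ '*' then (st.1 ++ [i], st.2)
          else (st.1 ++ [PySem.List.pyGetD cen st.2 '?'], st.2 + 1))
        (res, (j : Int))
      = (res ++ pvInter t (cen.drop j), ((j + t.count '*' : Nat) : Int)) := by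
  intro t
  induction t with
  | nil => intro res j; simp [pvInter]
  | cons c t ih =>
    intro res j
    by_cases hc : c = '*'
    · subst hc
      have h1 : ((j : Int) + 1) = ((j + 1 : Nat) : Int) := by push_cast; ring
      simp only [List.foldl_cons]
      rw [if_neg (fun h => h rfl), h1, ih (res ++ [PySem.List.pyGetD cen (j : Int) '?']) (j + 1)]
      simp [pvInter_star, PySem.List.pyGetD_natCast, List.tail_drop]
      omega
    · simp only [List.foldl_cons, if_pos hc]
      rw [ih (res ++ [c]) j]
      simp [pvInter_char hc, hc]

lemma pv_goSpec :
    ∀ (fuel : Nat) (l cur : List Char) (acc : List (List Char)),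
      l.length ≤ fuel →
      PySem.Chars.splitOn.go ['*'] fuel l cur acc = acc.reverse ++ pvSplit cur.reverse l := by
  intro fuel
  induction fuel with
  | zero =>
    intro l cur acc hl
    have : l = [] := by cases l <;> simp_all
    subst this
    simp [PySem.Chars.splitOn.go, pvSplit_nil]
  | succ n ih =>
    intro l cur acc hl
    cases l with
    | nil => simp [PySem.Chars.splitOn.go, pvSplit_nil]
    | cons c rest =>
      by_cases hc : c = '*'
      · subst hc
        have hpre : List.isPrefixOf ['*'] ('*' :: rest) = true := by
          simp [List.isPrefixOf]
        rw [PySem.Chars.splitOn.go]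
        simp only [hpre, if_true, List.length_cons, List.length_nil, List.drop_succ_cons,
          List.drop_zero]
        rw [ih rest [] (cur.reverse :: acc) (by simpa using Nat.le_of_succ_le_succ hl)]
        simp [pvSplit_star]
      · have hpre : List.isPrefixOf ['*'] (c :: rest) = false := by
          simp [List.isPrefixOf]; exact fun h => (hc h.symm).elim
        rw [PySem.Chars.splitOn.go]
        simp only [hpre, Bool.false_eq_true, if_false]
        rw [ih rest (c :: cur) acc (by simpa using Nat.le_of_succ_le_succ hl)]
        simp [pvSplit_char hc]

lemma pv_splitOn_eq (l : List Char) :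
    PySem.Chars.splitOn l ['*'] = pvSplit [] l := by
  rw [PySem.Chars.splitOn, pv_goSpec (l.length + 1) l [] [] (by omega)]
  simp

lemma pv_split_ne_nil (pre t : List Char) : pvSplit pre t ≠ [] := by
  induction t generalizing pre with
  | nil => simp [pvSplit_nil]
  | cons c t ih =>
    by_cases hc : c = '*'
    · subst hc; simp [pvSplit_star]
    · rw [pvSplit_char hc]; exact ih _

lemma pv_assemble :
    ∀ (t pre ks : List Char), t.count '*' ≤ ks.length →
      (pvSplit pre t).headD [] ++
        PySem.Chars.join [] ((ks.zip (pvSplit pre t).tail).map (fun p => p.1 :: p.2))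
      = pre ++ pvInter t ks := by
  intro t
  induction t with
  | nil => intro pre ks _; simp [pvSplit_nil, pvInter, PySem.Chars.join_nil]
  | cons c t ih =>
    intro pre ks hk
    by_cases hc : c = '*'
    · subst hc
      have hcount : t.count '*' + 1 ≤ ks.length := by
        simpa [List.count_cons] using hk
      cases ks with
      | nil => simp at hcount
      | cons k ks' =>
        have hk' : t.count '*' ≤ ks'.length := by simpa using hcount
        obtain ⟨q, qs, hq⟩ := List.exists_cons_of_ne_nil (pv_split_ne_nil [] t)
        have ihh := ih [] ks' hk'
        rw [hq] at ihh
        simp only [List.headD_cons, List.tail_cons, List.nil_append] at ihh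
        rw [pvSplit_star, pvInter_star]
        simp only [List.headD_cons, List.tail_cons, hq, List.zip_cons_cons, List.map_cons,
          pv_join_nil_cons]
        simp [ihh]
    · rw [pvSplit_char hc, pvInter_char hc,
        ih (pre ++ [c]) ks (by simpa [List.count_cons, hc] using hk)]
      simp

lemma pv_foldA0 (cen t : List Char) :
    t.foldl
      (fun (st : List Char × Int) i =>
        if i ≠ '*' then (st.1 ++ [i], st.2)
        else (st.1 ++ [PySem.List.pyGetD cen st.2 '?'], st.2 + 1))
      ([], 0)
    = (pvInter t cen, (t.count '*' : Int)) := by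
  have h := pv_foldA cen t [] 0
  simpa using h

-- ===== VERDICT (by name: the statement is the Claim_ definition above) =====
theorem task6_spec : Claim_equal_task6 := by
  intro text censored _hdom hpre
  unfold Spec_task6 task6 task6_alt
  simp only [pv_foldA0 censored.toList text.toList, pv_splitOn_eq]
  rw [pv_assemble text.toList [] censored.toList hpre]
  simp
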